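-- pv_equiv track=rewrite | github.com/reinaertvandecruys/big-data-analytics | assignments/b_topic_drift.py | get_year_ranges
-- ===== SOURCE A (Python) =====
-- from math import ceil, floor
--
-- DRIFT_INTERVAL = 10
--
-- DRIFT_REFERENCE = 0
--
-- DRIFT_FORWARD_OVERLAP = 0
--
-- DRIFT_BACKWARD_OVERLAP = 0
--
-- def get_year_ranges(year):
--     year_ranges = []
--
--     offset = (year - DRIFT_REFERENCE)
--     num_offset_intervals = floor(offset / DRIFT_INTERVAL)
--
--     begin_year = num_offset_intervals * DRIFT_INTERVAL + DRIFT_REFERENCE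
--     end_year = begin_year + DRIFT_INTERVAL - 1
--
--     while year >= begin_year - DRIFT_BACKWARD_OVERLAP and year <= end_year + DRIFT_FORWARD_OVERLAP:
--         year_ranges.append((begin_year - DRIFT_BACKWARD_OVERLAP,
--                             end_year + DRIFT_FORWARD_OVERLAP))
--
--         begin_year -= DRIFT_INTERVAL
--         end_year -= DRIFT_INTERVAL
--
--     begin_year = year_ranges[0][0] + DRIFT_INTERVAL + DRIFT_BACKWARD_OVERLAP
--     end_year = year_ranges[0][1] + DRIFT_INTERVAL - DRIFT_FORWARD_OVERLAP
--
--     while year >= begin_year - DRIFT_BACKWARD_OVERLAP and year <= end_year + DRIFT_FORWARD_OVERLAP: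
--         year_ranges.append((begin_year - DRIFT_BACKWARD_OVERLAP,
--                             end_year + DRIFT_FORWARD_OVERLAP))
--
--         begin_year += DRIFT_INTERVAL
--         end_year += DRIFT_INTERVAL
--
--     return sorted(year_ranges)
-- ===== SOURCE B (Python) =====
-- from math import floor
--
-- DRIFT_INTERVAL = 10
-- DRIFT_REFERENCE = 0
--
-- def get_year_ranges(year):
--     # With zero overlaps, the drift ranges partition the years into aligned
--     # decade blocks, so the answer is the single block containing `year`.
--     base = floor((year - DRIFT_REFERENCE) / DRIFT_INTERVAL) * DRIFT_INTERVAL + DRIFT_REFERENCE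
--     return [(base, base + DRIFT_INTERVAL - 1)]
-- ===== Notes on version B (the rewrite author's own statement) =====
-- stated objective: simpler
-- what changed: Replaces the two while-loops and final sort with a direct closed-form computation of the single aligned decade block containing the year (with zero overlaps both loops contribute exactly one range).
import Mathlib
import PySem

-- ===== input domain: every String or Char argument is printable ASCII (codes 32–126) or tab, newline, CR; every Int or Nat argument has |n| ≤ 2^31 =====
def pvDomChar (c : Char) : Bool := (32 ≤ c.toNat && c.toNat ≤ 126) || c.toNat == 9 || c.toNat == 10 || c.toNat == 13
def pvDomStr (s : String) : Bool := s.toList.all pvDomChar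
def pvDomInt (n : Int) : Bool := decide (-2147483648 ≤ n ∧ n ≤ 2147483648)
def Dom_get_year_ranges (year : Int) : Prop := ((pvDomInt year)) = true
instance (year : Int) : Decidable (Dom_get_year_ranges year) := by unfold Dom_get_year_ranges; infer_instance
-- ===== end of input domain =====

-- B replaces A's two while-loops and sort by the closed-form single decade block containing the year (simpler).


-- ===== PORT A =====
-- first while loop: walks backwards by DRIFT_INTERVAL while year is inside [begin-0, end+0]
def gyrLoop1 (year begin_year end_year : Int) (acc : List (Int × Int)) : List (Int × Int) :=
  if year ≥ begin_year - 0 ∧ year ≤ end_year + 0 then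
    gyrLoop1 year (begin_year - 10) (end_year - 10) (acc ++ [(begin_year - 0, end_year + 0)])
  else acc
termination_by (end_year - year + 1).toNat
decreasing_by omega

-- second while loop: walks forwards by DRIFT_INTERVAL
def gyrLoop2 (year begin_year end_year : Int) (acc : List (Int × Int)) : List (Int × Int) :=
  if year ≥ begin_year - 0 ∧ year ≤ end_year + 0 then
    gyrLoop2 year (begin_year + 10) (end_year + 10) (acc ++ [(begin_year - 0, end_year + 0)])
  else acc
termination_by (year - begin_year + 1).toNat
decreasing_by omega

def get_year_ranges (year : Int) : List (Int × Int) :=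
  let num_offset_intervals := PySem.Int.floordiv (year - 0) 10  -- floor(offset / DRIFT_INTERVAL), exact for ints
  let begin_year := num_offset_intervals * 10 + 0
  let end_year := begin_year + 10 - 1
  let year_ranges := gyrLoop1 year begin_year end_year []
  -- year_ranges[0]: Python would raise IndexError on an empty list; unreachable (first loop always appends)
  match PySem.List.pyGet? year_ranges 0 with
  | none => []
  | some (p1, p2) =>
    let begin_year := p1 + 10 + 0
    let end_year := p2 + 10 - 0
    let year_ranges := gyrLoop2 year begin_year end_year year_ranges
    PySem.List.sorted2 year_ranges (fun x => x.1) (fun x => x.2) false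

-- ===== PORT B =====
def get_year_ranges_alt (year : Int) : List (Int × Int) :=
  let base := PySem.Int.floordiv (year - 0) 10 * 10 + 0
  [(base, base + 10 - 1)]

-- ===== PRECONDITION & SPEC =====
def Spec_get_year_ranges (year : Int) (out : List (Int × Int)) : Prop := out = get_year_ranges_alt year
instance (year : Int) (out : List (Int × Int)) : Decidable (Spec_get_year_ranges year out) := by unfold Spec_get_year_ranges; infer_instance

-- ===== CLAIM (what is proved, stated in full; the proofs are below) =====
def Claim_equal_get_year_ranges : Prop := ∀ (year : Int), Dom_get_year_ranges year → Spec_get_year_ranges year (get_year_ranges year)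

-- ===== LEMMAS AND PROOFS =====
theorem gyr_base_bounds (year : Int) :
    PySem.Int.floordiv year 10 * 10 ≤ year ∧ year < PySem.Int.floordiv year 10 * 10 + 10 := by
  have h := PySem.Int.floordiv_eq_iff_of_pos (a := year) (b := 10) (q := PySem.Int.floordiv year 10) (by norm_num)
  have := h.mp rfl
  omega

theorem gyrLoop1_once (year b : Int) (h1 : b ≤ year) (h2 : year ≤ b + 9) :
    gyrLoop1 year b (b + 10 - 1) [] = [(b, b + 10 - 1)] := by
  rw [gyrLoop1, if_pos (by constructor <;> omega)]
  rw [gyrLoop1, if_neg (by omega)]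
  simp

theorem gyrLoop2_none (year b e : Int) (h : year < b) (acc : List (Int × Int)) :
    gyrLoop2 year b e acc = acc := by
  rw [gyrLoop2, if_neg (by omega)]

-- ===== VERDICT (by name: the statement is the Claim_ definition above) =====
theorem get_year_ranges_spec : Claim_equal_get_year_ranges := by
  intro year _
  unfold Spec_get_year_ranges get_year_ranges get_year_ranges_alt
  have hb := gyr_base_bounds year
  generalize hq : PySem.Int.floordiv year 10 = q at *
  simp only [sub_zero, add_zero]
  rw [hq]
  rw [gyrLoop1_once year (q * 10) hb.1 (by omega)]
  simp only [PySem.List.pyGet?, PySem.List.pyIdx?]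
  norm_num
  rw [gyrLoop2_none year (q * 10 + 10) _ (by omega)]
  simp [PySem.List.sorted2, PySem.List.insertBy]
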